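-- pv_equiv track=rewrite | github.com/instances-generator/OLA | instance_generator.py | add_surgeon_assignment_for_operation
-- ===== SOURCE A (Python) =====
-- def add_surgeon_assignment_for_operation(num_surgeons, num_operations):
--     '''This is variable C [C][O].
--        Each surgeon alternates cyclically for each operation.'''
--     matrix = []
--     for i in range(num_surgeons):
--         matrix.append([])
--     for i in range(num_operations):
--         current_surgeon = i % num_surgeons
--         for j in range(num_surgeons):
--             if current_surgeon == j:
--                 matrix[j].append(1)
--             else:
--                 matrix[j].append(0)
--     return matrix, "C = " + str(matrix) + "; \n"
-- ===== SOURCE B (Python) =====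
-- def add_surgeon_assignment_for_operation(num_surgeons, num_operations):
--     '''This is variable C [C][O].
--        Each surgeon alternates cyclically for each operation.'''
--     if num_surgeons > 0:
--         total = max(num_operations, 0)
--         cycles, rem = divmod(total, num_surgeons)
--     else:
--         total, cycles, rem = 0, 0, 0
--     matrix = []
--     for j in range(num_surgeons):
--         row = [0] * total
--         row[j::num_surgeons] = [1] * (cycles + (1 if j < rem else 0))
--         matrix.append(row)
--     return matrix, "C = " + str(matrix) + "; \n"
-- ===== Notes on version B (the rewrite author's own statement) =====
-- stated objective: alternative
-- what changed: B never evaluates i % num_surgeons per cell: from one divmod it builds each surgeon's row as a zero row of length total and scatters the 1s into it with a strided slice assignment row[j::num_surgeons] = [1]*count, instead of A's per-operation loop that appends an indicator cell to every row.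
import Mathlib
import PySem

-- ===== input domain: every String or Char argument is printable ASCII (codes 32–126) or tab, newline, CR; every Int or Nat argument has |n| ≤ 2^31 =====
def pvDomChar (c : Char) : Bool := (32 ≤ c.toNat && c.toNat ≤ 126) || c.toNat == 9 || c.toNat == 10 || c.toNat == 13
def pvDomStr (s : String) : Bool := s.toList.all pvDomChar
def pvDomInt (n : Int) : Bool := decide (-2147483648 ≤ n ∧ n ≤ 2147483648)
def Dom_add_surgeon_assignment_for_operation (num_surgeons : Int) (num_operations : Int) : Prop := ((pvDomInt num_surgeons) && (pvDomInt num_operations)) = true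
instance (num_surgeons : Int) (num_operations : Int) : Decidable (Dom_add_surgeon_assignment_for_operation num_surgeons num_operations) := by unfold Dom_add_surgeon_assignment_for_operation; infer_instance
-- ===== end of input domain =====

-- B scatters the 1s of each surgeon's row into a zero row by a strided slice assignment driven by
-- one divmod, instead of A's per-operation modulo loop; equivalence of return values proved on Pre_
-- (A's ZeroDivisionError at num_surgeons == 0 ∧ num_operations > 0 excluded).

-- hand port of Python's builtin str() on a list of lists of ints (exact: "[[1, 0], []]" style);
-- shared by both ports since both Pythons call the same builtin on their matrix
def pyStrRow (r : List Int) : String :=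
  "[" ++ String.intercalate ", " (r.map PySem.Int.toStr) ++ "]"
def pyStrMatrix (m : List (List Int)) : String :=
  "[" ++ String.intercalate ", " (m.map pyStrRow) ++ "]"

-- ===== PORT A =====
def add_surgeon_assignment_for_operation (num_surgeons : Int) (num_operations : Int) : List (List Int) × String :=
  -- for i in range(num_surgeons): matrix.append([])
  let matrix0 : List (List Int) :=
    (PySem.List.pyRange 0 num_surgeons 1).foldl (fun m _ => m ++ [([] : List Int)]) []
  -- for i in range(num_operations): current_surgeon = i % num_surgeons; for j in range(num_surgeons): matrix[j].append(1 or 0)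
  let matrix : List (List Int) :=
    (PySem.List.pyRange 0 num_operations 1).foldl (fun m i =>
      let current_surgeon := PySem.Int.mod i num_surgeons
      (PySem.List.pyRange 0 num_surgeons 1).foldl (fun m2 j =>
        m2.modify j.toNat (fun row => if current_surgeon = j then row ++ [1] else row ++ [0])) m) matrix0
  (matrix, "C = " ++ pyStrMatrix matrix ++ "; \n")

-- ===== PORT B =====
def add_surgeon_assignment_for_operation_alt (num_surgeons : Int) (num_operations : Int) : List (List Int) × String :=
  -- total = max(num_operations, 0); cycles, rem = divmod(total, num_surgeons)   (0,0,0 when num_surgeons ≤ 0)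
  let tcr : Int × Int × Int :=
    if num_surgeons > 0 then
      (max num_operations 0,
       PySem.Int.floordiv (max num_operations 0) num_surgeons,
       PySem.Int.mod (max num_operations 0) num_surgeons)
    else (0, 0, 0)
  -- for j in range(num_surgeons): row = [0]*total; row[j::num_surgeons] = [1]*(cycles + (1 if j < rem else 0))
  -- the strided slice assignment is ported as a fold setting positions j + k*num_surgeons, k < count
  -- (exact here: the assigned list has exactly the length of the extended slice)
  let matrix : List (List Int) :=
    (PySem.List.pyRange 0 num_surgeons 1).map (fun j =>
      let row : List Int := List.replicate tcr.1.toNat 0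
      let count : Int := tcr.2.1 + (if j < tcr.2.2 then 1 else 0)
      (List.range count.toNat).foldl (fun r k => r.set (j.toNat + k * num_surgeons.toNat) 1) row)
  (matrix, "C = " ++ pyStrMatrix matrix ++ "; \n")

-- ===== PRECONDITION & SPEC =====
-- Pre_ excludes exactly the inputs where Python A raises ZeroDivisionError (num_surgeons == 0 with num_operations > 0)
def Pre_add_surgeon_assignment_for_operation (num_surgeons : Int) (num_operations : Int) : Prop :=
  num_surgeons ≠ 0 ∨ num_operations ≤ 0
instance (num_surgeons : Int) (num_operations : Int) : Decidable (Pre_add_surgeon_assignment_for_operation num_surgeons num_operations) := by unfold Pre_add_surgeon_assignment_for_operation; infer_instance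
def pvWitness_add_surgeon_assignment_for_operation : Int × Int := (2, 5)

def Spec_add_surgeon_assignment_for_operation (num_surgeons : Int) (num_operations : Int) (out : List (List Int) × String) : Prop := out = add_surgeon_assignment_for_operation_alt num_surgeons num_operations
instance (num_surgeons : Int) (num_operations : Int) (out : List (List Int) × String) : Decidable (Spec_add_surgeon_assignment_for_operation num_surgeons num_operations out) := by unfold Spec_add_surgeon_assignment_for_operation; infer_instance

-- ===== CLAIM =====
def Claim_equal_add_surgeon_assignment_for_operation : Prop := ∀ (num_surgeons : Int) (num_operations : Int), Dom_add_surgeon_assignment_for_operation num_surgeons num_operations → Pre_add_surgeon_assignment_for_operation num_surgeons num_operations → Spec_add_surgeon_assignment_for_operation num_surgeons num_operations (add_surgeon_assignment_for_operation num_surgeons num_operations)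

-- ===== LEMMAS AND PROOFS =====

-- A's first loop just builds num_surgeons empty rows
lemma foldl_append_nil (L : List Int) : ∀ (init : List (List Int)),
    L.foldl (fun m _ => m ++ [([] : List Int)]) init = init ++ L.map (fun _ => []) := by
  induction L with
  | nil => intro init; simp
  | cons x xs ih => intro init; simp [List.foldl_cons, ih]

-- the inner j-loop over range n, each index modified once
lemma foldl_modify_range (u : ℕ → List Int → List Int) :
    ∀ (n : ℕ) (l : List (List Int)),
      (List.range n).foldl (fun m j => m.modify j (u j)) l
        = l.mapIdx (fun j row => if j < n then u j row else row) := by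
  intro n
  induction n with
  | zero =>
      intro l
      apply List.ext_getElem
      · simp
      · intro k hk hk'; simp
  | succ n ih =>
      intro l
      rw [List.range_succ, List.foldl_append, ih]
      apply List.ext_getElem
      · simp [List.length_modify]
      · intro k hk hk'
        simp only [List.foldl_cons, List.foldl_nil]
        rw [List.getElem_modify]
        by_cases h : n = k
        · subst h
          simp [List.getElem_mapIdx]
        · rw [if_neg h]
          simp only [List.getElem_mapIdx]
          by_cases h2 : k < n
          · simp [h2, Nat.lt_succ_of_lt h2]
          · have h3 : ¬ k < n + 1 := by omega
            simp [h2, h3]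

lemma pyRange_zero_cast (n : Int) :
    PySem.List.pyRange 0 n 1 = (List.range n.toNat).map (fun k : ℕ => (k : Int)) := by
  rw [PySem.List.pyRange_one]
  simp

lemma step_map (ns i : Int) (f : Int → List Int) :
    (PySem.List.pyRange 0 ns 1).foldl (fun m2 j =>
        m2.modify j.toNat (fun row => if PySem.Int.mod i ns = j then row ++ [1] else row ++ [0]))
      ((PySem.List.pyRange 0 ns 1).map f)
    = (PySem.List.pyRange 0 ns 1).map
        (fun j => f j ++ [if PySem.Int.mod i ns = j then (1 : Int) else 0]) := by
  rw [pyRange_zero_cast, List.foldl_map, List.map_map, List.map_map]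
  have key := foldl_modify_range
    (fun k row => if PySem.Int.mod i ns = (k : Int) then row ++ [1] else row ++ [0])
    ns.toNat ((List.range ns.toNat).map (fun k : ℕ => f (k : Int)))
  simp only [Int.toNat_natCast]
  rw [show ((List.range ns.toNat).map (f ∘ fun k : ℕ => (k : Int)))
      = ((List.range ns.toNat).map (fun k : ℕ => f (k : Int))) from by simp [Function.comp]]
  rw [key]
  apply List.ext_getElem
  · simp
  · intro k hk hk'
    have hkn : k < ns.toNat := by simpa using hk
    have h1 : (k : Int) < ns := by omega
    simp only [List.getElem_mapIdx, List.getElem_map, List.getElem_range, Function.comp_apply,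
      hkn, if_pos]
    split <;> rfl

-- the outer operation loop, by induction on the list of operation indices
lemma outer_loop (ns : Int) : ∀ (L : List Int) (f : Int → List Int),
    L.foldl (fun m i =>
        (PySem.List.pyRange 0 ns 1).foldl (fun m2 j =>
          m2.modify j.toNat (fun row => if PySem.Int.mod i ns = j then row ++ [1] else row ++ [0])) m)
      ((PySem.List.pyRange 0 ns 1).map f)
    = (PySem.List.pyRange 0 ns 1).map
        (fun j => f j ++ L.map (fun i => if PySem.Int.mod i ns = j then (1 : Int) else 0)) := by
  intro L
  induction L with
  | nil => intro f; simp
  | cons x xs ih =>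
      intro f
      rw [List.foldl_cons, step_map, ih]
      apply List.map_congr_left
      intro j _
      simp [List.append_assoc]

-- the strided scatter loop preserves length
lemma len_foldl_set (n jk : ℕ) : ∀ (c : ℕ) (row : List Int),
    ((List.range c).foldl (fun r k => r.set (jk + k * n) (1 : Int)) row).length = row.length := by
  intro c
  induction c with
  | zero => intro row; simp
  | succ c ih =>
      intro row
      rw [List.range_succ, List.foldl_append, List.foldl_cons, List.foldl_nil, List.length_set, ih]

-- element of the scatter loop: 1 at a touched position
lemma get?_foldl_set_hit (n jk : ℕ) : ∀ (c : ℕ) (row : List Int) (p : ℕ)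
    (_ : p < row.length) (_ : ∃ k, k < c ∧ p = jk + k * n),
    ((List.range c).foldl (fun r k => r.set (jk + k * n) (1 : Int)) row)[p]? = some 1 := by
  intro c
  induction c with
  | zero => intro row p hp h; exact absurd h (by simp)
  | succ c ih =>
      intro row p hp h
      rw [List.range_succ, List.foldl_append, List.foldl_cons, List.foldl_nil]
      rw [List.getElem?_set]
      by_cases he : jk + c * n = p
      · rw [if_pos he, if_pos (by rw [len_foldl_set, he]; exact hp)]
      · rw [if_neg he]
        obtain ⟨k, hk, hpe⟩ := h
        have hk' : k < c := by
          rcases Nat.lt_succ_iff_lt_or_eq.mp hk with h1 | h1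
          · exact h1
          · subst h1; exact absurd hpe.symm he
        exact ih row p hp ⟨k, hk', hpe⟩

-- element of the scatter loop: untouched positions keep the base value
lemma get?_foldl_set_miss (n jk : ℕ) : ∀ (c : ℕ) (row : List Int) (p : ℕ)
    (_ : ¬ ∃ k, k < c ∧ p = jk + k * n),
    ((List.range c).foldl (fun r k => r.set (jk + k * n) (1 : Int)) row)[p]? = row[p]? := by
  intro c
  induction c with
  | zero => intro row p h; rfl
  | succ c ih =>
      intro row p h
      rw [List.range_succ, List.foldl_append, List.foldl_cons, List.foldl_nil]
      rw [List.getElem?_set, if_neg (fun he => h ⟨c, Nat.lt_succ_self c, he.symm⟩)]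
      exact ih row p (fun ⟨k, hk, hpe⟩ => h ⟨k, Nat.lt_succ_of_lt hk, hpe⟩)

-- CORE: the cyclic indicator sequence over range L IS the strided scatter into a zero row
lemma strided (n jk L : ℕ) (hj : jk < n) :
    (List.range L).map (fun k => if k % n = jk then (1 : Int) else 0)
      = (List.range (L / n + (if jk < L % n then 1 else 0))).foldl
          (fun r k => r.set (jk + k * n) (1 : Int)) (List.replicate L 0) := by
  apply List.ext_getElem?
  intro p
  by_cases hpL : p < L
  · have hd : p / n * n + p % n = p := by rw [Nat.mul_comm]; exact Nat.div_add_mod p n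
    have hdL : L / n * n + L % n = L := by rw [Nat.mul_comm]; exact Nat.div_add_mod L n
    rw [List.getElem?_map, List.getElem?_range hpL]
    by_cases h : p % n = jk
    · have hkc : p / n < L / n + (if jk < L % n then 1 else 0) := by
        have hle : p / n ≤ L / n := Nat.div_le_div_right (Nat.le_of_lt hpL)
        by_cases hjr : jk < L % n
        · rw [if_pos hjr]; omega
        · rw [if_neg hjr]
          rcases Nat.lt_or_ge (p / n) (L / n) with h1 | h1
          · exact h1
          · exfalso
            have he : p / n = L / n := Nat.le_antisymm hle h1
            rw [he, h] at hd
            have hjr' : L % n ≤ jk := Nat.le_of_not_lt hjr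
            linarith
      rw [get?_foldl_set_hit n jk _ _ p (by simpa using hpL) ⟨p / n, hkc, by rw [← h]; exact (Nat.mod_add_div' p n).symm⟩]
      simp [h]
    · have hmiss : ¬ ∃ k, k < L / n + (if jk < L % n then 1 else 0) ∧ p = jk + k * n := by
        rintro ⟨k, _, hpe⟩
        apply h
        rw [hpe, Nat.add_mul_mod_self_right, Nat.mod_eq_of_lt hj]
      rw [get?_foldl_set_miss n jk _ _ p hmiss]
      simp [h, hpL]
  · rw [List.getElem?_eq_none (by simpa using Nat.le_of_not_lt hpL),
        List.getElem?_eq_none (by rw [len_foldl_set]; simpa using Nat.le_of_not_lt hpL)]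

-- ===== VERDICT =====
theorem add_surgeon_assignment_for_operation_spec : Claim_equal_add_surgeon_assignment_for_operation := by
  intro ns no _ hpre
  unfold Spec_add_surgeon_assignment_for_operation
  unfold add_surgeon_assignment_for_operation add_surgeon_assignment_for_operation_alt
  simp only []
  have h0 : (PySem.List.pyRange 0 ns 1).foldl (fun m _ => m ++ [([] : List Int)]) []
      = (PySem.List.pyRange 0 ns 1).map (fun _ => ([] : List Int)) := by
    simp [foldl_append_nil (PySem.List.pyRange 0 ns 1) []]
  rw [h0, outer_loop ns (PySem.List.pyRange 0 no 1) (fun _ => ([] : List Int))]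
  -- the two matrices agree; then the strings agree
  have hmat : (PySem.List.pyRange 0 ns 1).map
      (fun j => ([] : List Int) ++ (PySem.List.pyRange 0 no 1).map
        (fun i => if PySem.Int.mod i ns = j then (1 : Int) else 0))
      = (PySem.List.pyRange 0 ns 1).map (fun j =>
          (List.range ((if ns > 0 then
              (max no 0, PySem.Int.floordiv (max no 0) ns, PySem.Int.mod (max no 0) ns)
            else ((0 : Int), (0 : Int), (0 : Int))).2.1
            + (if j < (if ns > 0 then
                (max no 0, PySem.Int.floordiv (max no 0) ns, PySem.Int.mod (max no 0) ns)
              else ((0 : Int), (0 : Int), (0 : Int))).2.2 then 1 else 0)).toNat).foldl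
            (fun r k => r.set (j.toNat + k * ns.toNat) 1)
            (List.replicate (if ns > 0 then
                (max no 0, PySem.Int.floordiv (max no 0) ns, PySem.Int.mod (max no 0) ns)
              else ((0 : Int), (0 : Int), (0 : Int))).1.toNat 0)) := by
    by_cases hns : ns > 0
    · have hnsn : ns = ((ns.toNat : ℕ) : Int) := by omega
      have hmax : max no 0 = ((no.toNat : ℕ) : Int) := by omega
      simp only [if_pos hns]
      rw [pyRange_zero_cast ns, List.map_map, List.map_map]
      apply List.map_congr_left
      intro jk hjk
      have hjn : jk < ns.toNat := List.mem_range.mp hjk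
      simp only [Function.comp_apply, List.nil_append, Int.toNat_natCast]
      -- rewrite the operation indices and the mod test into Nat form
      rw [pyRange_zero_cast no, List.map_map]
      have hmod : ((fun i => if PySem.Int.mod i ns = (jk : Int) then (1 : Int) else 0)
            ∘ (fun k : ℕ => (k : Int)))
          = (fun k : ℕ => if k % ns.toNat = jk then (1 : Int) else 0) := by
        funext k
        have : PySem.Int.mod (k : Int) ns = ((k % ns.toNat : ℕ) : Int) := by
          rw [hnsn]; exact PySem.Int.mod_natCast k ns.toNat
        simp only [Function.comp_apply]
        rw [this]
        by_cases h : k % ns.toNat = jk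
        · rw [if_pos h, if_pos (by exact_mod_cast h)]
        · rw [if_neg h, if_neg (by exact_mod_cast h)]
      rw [hmod]
      -- rewrite divmod and the count into Nat form
      have hq : PySem.Int.floordiv (max no 0) ns = ((no.toNat / ns.toNat : ℕ) : Int) := by
        rw [hmax, hnsn]; exact PySem.Int.floordiv_natCast no.toNat ns.toNat
      have hr : PySem.Int.mod (max no 0) ns = ((no.toNat % ns.toNat : ℕ) : Int) := by
        rw [hmax, hnsn]; exact PySem.Int.mod_natCast no.toNat ns.toNat
      have htot : (max no 0).toNat = no.toNat := by omega
      rw [hq, hr, htot]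
      have hcnt : (((no.toNat / ns.toNat : ℕ) : Int)
            + (if (jk : Int) < ((no.toNat % ns.toNat : ℕ) : Int) then 1 else 0)).toNat
          = no.toNat / ns.toNat + (if jk < no.toNat % ns.toNat then 1 else 0) := by
        by_cases h : jk < no.toNat % ns.toNat
        · rw [if_pos h, if_pos (show (jk : Int) < ((no.toNat % ns.toNat : ℕ) : Int) from by exact_mod_cast h)]
          rw [show ((no.toNat / ns.toNat : ℕ) : Int) + 1 = ((no.toNat / ns.toNat + 1 : ℕ) : Int) from by push_cast; ring]
          exact Int.toNat_natCast _
        · rw [if_neg h, if_neg (show ¬ (jk : Int) < ((no.toNat % ns.toNat : ℕ) : Int) from by exact_mod_cast h)]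
          rw [add_zero, Nat.add_zero]
          exact Int.toNat_natCast _
      rw [hcnt]
      exact strided ns.toNat jk no.toNat hjn
    · -- ns ≤ 0: both ranges are empty, both matrices are []
      have : PySem.List.pyRange 0 ns 1 = [] := by
        rw [pyRange_zero_cast ns]
        have : ns.toNat = 0 := by omega
        simp [this]
      simp [this]
  rw [hmat]
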